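-- pv_equiv track=rewrite | github.com/MAjavanta/AdventOfCode | 2024/03/solution.py | get_on_instructions
-- ===== SOURCE A (Python) =====
-- def get_on_instructions(instruction_list):
--     on_instructions = []
--     read_instruction = True
--
--     for instruction in instruction_list:
--         if instruction == "do()":
--             read_instruction = True
--             continue
--         elif instruction == "don't()":
--             read_instruction = False
--             continue
--         elif read_instruction:
--             on_instructions.append(instruction)
--     return on_instructions
-- ===== SOURCE B (Python) =====
-- def _take_until(xs, tok):
--     """Split xs at the first occurrence of tok: (part before it, part after it)."""
--     for i, x in enumerate(xs):
--         if x == tok: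
--             return xs[:i], xs[i + 1:]
--     return xs, []
--
--
-- def get_on_instructions(instruction_list):
--     # Segment-based: alternately take an enabled segment (up to the next
--     # "don't()") and skip a disabled segment (up to the next "do()").
--     on_instructions = []
--     rest = instruction_list
--     while rest:
--         segment, rest = _take_until(rest, "don't()")
--         on_instructions += [x for x in segment if x != "do()"]
--         _, rest = _take_until(rest, "do()")
--     return on_instructions
-- ===== Notes on version B (the rewrite author's own statement) =====
-- stated objective: alternative
-- what changed: Replaces A's single pass carrying an enabled flag with alternating segment splits: repeatedly take everything up to the next don't() (keeping non-do() items) and then skip everything up to the next do().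
import Mathlib
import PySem

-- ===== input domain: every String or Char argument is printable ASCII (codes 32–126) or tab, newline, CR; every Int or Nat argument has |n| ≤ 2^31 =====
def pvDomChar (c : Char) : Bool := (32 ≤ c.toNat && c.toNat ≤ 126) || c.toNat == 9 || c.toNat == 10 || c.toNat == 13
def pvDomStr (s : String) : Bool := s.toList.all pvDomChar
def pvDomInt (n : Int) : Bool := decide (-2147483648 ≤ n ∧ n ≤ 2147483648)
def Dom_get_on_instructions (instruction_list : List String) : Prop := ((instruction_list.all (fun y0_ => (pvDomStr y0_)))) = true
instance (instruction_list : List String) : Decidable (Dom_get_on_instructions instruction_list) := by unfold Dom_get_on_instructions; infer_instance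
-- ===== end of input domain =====

-- B replaces A's single flag-carrying loop by alternating segment splits (take the
-- enabled segment up to the next "don't()", skip up to the next "do()"): a different
-- decomposition of the same exact filtering ('alternative', no speed claim).

-- ===== PORT A =====
-- A's loop carries (on_instructions, read_instruction); ported as a foldl over the same pair state.
def get_on_instructions (instruction_list : List String) : List String :=
  (instruction_list.foldl
    (fun (st : List String × Bool) instruction =>
      if instruction == "do()" then (st.1, true)
      else if instruction == "don't()" then (st.1, false)
      else if st.2 then (st.1 ++ [instruction], st.2)
      else st)
    ([], true)).1

-- ===== PORT B =====
-- Source B's _take_until: split at the first occurrence of tok.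
def pvTakeUntil (tok : String) : List String → List String × List String
  | [] => ([], [])
  | x :: xs =>
    if x == tok then ([], xs)
    else
      let p := pvTakeUntil tok xs
      (x :: p.1, p.2)

theorem pvTakeUntil_snd_le (tok : String) (l : List String) :
    (pvTakeUntil tok l).2.length ≤ l.length := by
  induction l with
  | nil => simp [pvTakeUntil]
  | cons x xs ih =>
    simp only [pvTakeUntil]
    split
    · simp
    · have := ih
      simp
      omega

theorem pvTakeUntil_snd_lt (tok x : String) (xs : List String) :
    (pvTakeUntil tok (x :: xs)).2.length < (x :: xs).length := by
  simp only [pvTakeUntil]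
  split
  · simp
  · have := pvTakeUntil_snd_le tok xs
    simp; omega

-- Source B's while loop: alternately take an enabled segment and skip a disabled one.
def pvAltLoop : List String → List String
  | [] => []
  | x :: xs =>
    let p1 := pvTakeUntil "don't()" (x :: xs)
    let p2 := pvTakeUntil "do()" p1.2
    (p1.1.filter (fun y => y != "do()")) ++ pvAltLoop p2.2
termination_by l => l.length
decreasing_by
  have h1 : (pvTakeUntil "don't()" (x :: xs)).2.length < (x :: xs).length :=
    pvTakeUntil_snd_lt _ x xs
  have h2 := pvTakeUntil_snd_le "do()" (pvTakeUntil "don't()" (x :: xs)).2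
  simpa using lt_of_le_of_lt h2 h1

def get_on_instructions_alt (instruction_list : List String) : List String :=
  pvAltLoop instruction_list

-- ===== PRECONDITION & SPEC =====
def Spec_get_on_instructions (instruction_list : List String) (out : List String) : Prop := out = get_on_instructions_alt instruction_list
instance (instruction_list : List String) (out : List String) : Decidable (Spec_get_on_instructions instruction_list out) := by unfold Spec_get_on_instructions; infer_instance

-- ===== CLAIM (what is proved, stated in full; the proofs are below) =====
def Claim_equal_get_on_instructions : Prop := ∀ (instruction_list : List String), Dom_get_on_instructions instruction_list → Spec_get_on_instructions instruction_list (get_on_instructions instruction_list)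

-- ===== LEMMAS AND PROOFS =====

-- A's result in structural form (used only in the proofs): the flag-machine.
def pvGo (read : Bool) : List String → List String
  | [] => []
  | x :: xs =>
    if x == "do()" then pvGo true xs
    else if x == "don't()" then pvGo false xs
    else if read then x :: pvGo read xs
    else pvGo read xs

theorem pvFoldl_eq_pvGo (xs : List String) : ∀ (acc : List String) (r : Bool),
    (xs.foldl
      (fun (st : List String × Bool) instruction =>
        if instruction == "do()" then (st.1, true)
        else if instruction == "don't()" then (st.1, false)
        else if st.2 then (st.1 ++ [instruction], st.2)
        else st)
      (acc, r)).1 = acc ++ pvGo r xs := by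
  induction xs with
  | nil => intro acc r; simp [pvGo]
  | cons x xs ih =>
    intro acc r
    by_cases h1 : x == "do()"
    · simp only [List.foldl, pvGo, h1, reduceIte]
      exact ih acc true
    · by_cases h2 : x == "don't()"
      · simp only [List.foldl, pvGo, h1, h2, Bool.false_eq_true, reduceIte]
        exact ih acc false
      · cases r with
        | true =>
          simp only [List.foldl, pvGo, h1, h2, Bool.false_eq_true, reduceIte]
          rw [ih (acc ++ [x]) true]
          simp
        | false =>
          simp only [List.foldl, pvGo, h1, h2, Bool.false_eq_true, reduceIte]
          exact ih acc false

theorem pvAltLoop_eq (xs : List String) :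
    pvAltLoop xs =
      ((pvTakeUntil "don't()" xs).1.filter (fun y => y != "do()")) ++
        pvAltLoop (pvTakeUntil "do()" (pvTakeUntil "don't()" xs).2).2 := by
  cases xs with
  | nil => simp [pvAltLoop, pvTakeUntil]
  | cons x xs => rw [pvAltLoop]

theorem pvGo_eq_pvAltLoop (xs : List String) :
    pvGo true xs = pvAltLoop xs ∧
    pvGo false xs = pvAltLoop (pvTakeUntil "do()" xs).2 := by
  induction xs with
  | nil => constructor <;> simp [pvGo, pvAltLoop, pvTakeUntil]
  | cons x xs ih =>
    obtain ⟨ihT, ihF⟩ := ih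
    constructor
    · rw [pvAltLoop_eq (x :: xs)]
      by_cases h1 : x == "do()"
      · have hx : x = "do()" := by simpa using h1
        have hne : (x == "don't()") = false := by simp [hx]
        simp only [pvGo, h1, if_pos, pvTakeUntil, Bool.false_eq_true,
          reduceIte]
        rw [ihT, pvAltLoop_eq xs]
        simp [List.filter, hx]
      · by_cases h2 : x == "don't()"
        · simp only [pvGo, h1, h2, pvTakeUntil, Bool.false_eq_true, reduceIte]
          simpa using ihF
        · simp only [pvGo, h1, h2, pvTakeUntil, Bool.false_eq_true, reduceIte, if_pos]
          rw [ihT, pvAltLoop_eq xs]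
          simp [List.filter, bne, h1]
    · by_cases h1 : x == "do()"
      · have hx : x = "do()" := by simpa using h1
        simp only [pvGo, h1, pvTakeUntil, if_pos]
        simpa [hx] using ihT
      · by_cases h2 : x == "don't()"
        · have hne : (x == "do()") = false := by simpa using h1
          simp only [pvGo, h1, h2, pvTakeUntil, Bool.false_eq_true, reduceIte]
          exact ihF
        · have hne : (x == "do()") = false := by simpa using h1
          simp only [pvGo, h1, h2, pvTakeUntil, Bool.false_eq_true, reduceIte]
          exact ihF

-- ===== VERDICT (by name: the statement is the Claim_ definition above) =====
theorem get_on_instructions_spec : Claim_equal_get_on_instructions := by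
  intro l _
  unfold Spec_get_on_instructions get_on_instructions get_on_instructions_alt
  rw [pvFoldl_eq_pvGo l [] true, (pvGo_eq_pvAltLoop l).1]
  simp
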